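-- pv_equiv track=rewrite | github.com/offshore4190/finai | diagnose_coverage.py | classify_company_by_filings
-- ===== SOURCE A (Python) =====
-- FILING_PATTERNS = {
--     'US_DOMESTIC': ['10-K', '10-Q'],
--     'FOREIGN_PRIVATE': ['20-F', '6-K'],
--     'FUND': ['N-CSR', 'N-PORT', 'N-CEN', 'N-Q', 'NPORT-P', 'NPORT-EX']
-- }
--
-- def classify_company_by_filings(form_types):
--     """Classify company by their filing types."""
--     if not form_types:
--         return 'NO_FILINGS'
--
--     form_set = set(form_types)
--
--     # Check for US domestic (10-K/10-Q)
--     if any(f in FILING_PATTERNS['US_DOMESTIC'] for f in form_set):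
--         return 'US_DOMESTIC'
--
--     # Check for foreign private issuer
--     if any(f in FILING_PATTERNS['FOREIGN_PRIVATE'] for f in form_set):
--         return 'FOREIGN_PRIVATE'
--
--     # Check for fund
--     if any(f in FILING_PATTERNS['FUND'] for f in form_set):
--         return 'FUND'
--
--     return 'OTHER'
-- ===== SOURCE B (Python) =====
-- FILING_PATTERNS = {
--     'US_DOMESTIC': ['10-K', '10-Q'],
--     'FOREIGN_PRIVATE': ['20-F', '6-K'],
--     'FUND': ['N-CSR', 'N-PORT', 'N-CEN', 'N-Q', 'NPORT-P', 'NPORT-EX']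
-- }
--
-- # Inverted index: form type -> category, built once at module load.
-- _FORM_CATEGORY = {form: cat for cat, forms in FILING_PATTERNS.items() for form in forms}
-- _PRIORITY = ['US_DOMESTIC', 'FOREIGN_PRIVATE', 'FUND']
--
-- def classify_company_by_filings(form_types):
--     """Classify company by their filing types."""
--     if not form_types:
--         return 'NO_FILINGS'
--     matched = {_FORM_CATEGORY[f] for f in set(form_types) if f in _FORM_CATEGORY}
--     for cat in _PRIORITY:
--         if cat in matched:
--             return cat
--     return 'OTHER'
-- ===== Notes on version B (the rewrite author's own statement) =====
-- stated objective: alternative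
-- what changed: Replaces three sequential any-scans over the form set (each testing membership in a category's pattern list) by an inverted form->category dict built once at module load, a single pass over the set collecting matched categories, and a read of a fixed priority list.
import Mathlib
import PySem

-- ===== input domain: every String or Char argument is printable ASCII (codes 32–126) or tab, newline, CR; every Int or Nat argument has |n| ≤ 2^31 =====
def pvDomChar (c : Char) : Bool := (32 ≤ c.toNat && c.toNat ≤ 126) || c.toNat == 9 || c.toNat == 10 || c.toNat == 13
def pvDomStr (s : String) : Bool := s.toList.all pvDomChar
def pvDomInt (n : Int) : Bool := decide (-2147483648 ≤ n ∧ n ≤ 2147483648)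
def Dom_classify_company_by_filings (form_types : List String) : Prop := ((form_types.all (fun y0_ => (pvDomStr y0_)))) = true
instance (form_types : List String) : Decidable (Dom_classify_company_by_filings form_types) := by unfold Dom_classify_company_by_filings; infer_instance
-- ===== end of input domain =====

-- B replaces A's three sequential any-scans by an inverted form->category index,
-- one pass over the deduplicated forms collecting matched categories, and a priority-list read.

-- ===== PORT A =====
def FILING_PATTERNS : PySem.Dict String (List String) :=
  PySem.Dict.ofList
    [("US_DOMESTIC", ["10-K", "10-Q"]),
     ("FOREIGN_PRIVATE", ["20-F", "6-K"]),
     ("FUND", ["N-CSR", "N-PORT", "N-CEN", "N-Q", "NPORT-P", "NPORT-EX"])]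

def classify_company_by_filings (form_types : List String) : String :=
  if form_types = [] then "NO_FILINGS"
  else
    let form_set : PySem.Set String := PySem.Set.ofList form_types
    if form_set.any (fun f => (FILING_PATTERNS.getD "US_DOMESTIC" []).contains f) then "US_DOMESTIC"
    else if form_set.any (fun f => (FILING_PATTERNS.getD "FOREIGN_PRIVATE" []).contains f) then "FOREIGN_PRIVATE"
    else if form_set.any (fun f => (FILING_PATTERNS.getD "FUND" []).contains f) then "FUND"
    else "OTHER"

-- ===== PORT B =====
-- inverted index built once (Source B's _FORM_CATEGORY)
def pvFormCategory : PySem.Dict String String :=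
  PySem.Dict.ofList
    [("10-K", "US_DOMESTIC"), ("10-Q", "US_DOMESTIC"),
     ("20-F", "FOREIGN_PRIVATE"), ("6-K", "FOREIGN_PRIVATE"),
     ("N-CSR", "FUND"), ("N-PORT", "FUND"), ("N-CEN", "FUND"),
     ("N-Q", "FUND"), ("NPORT-P", "FUND"), ("NPORT-EX", "FUND")]

def pvPriority : List String := ["US_DOMESTIC", "FOREIGN_PRIVATE", "FUND"]

def classify_company_by_filings_alt (form_types : List String) : String :=
  if form_types = [] then "NO_FILINGS"
  else
    let matched : PySem.Set String :=
      (PySem.Set.ofList form_types).foldl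
        (fun acc f =>
          match pvFormCategory.get? f with
          | some c => PySem.Set.add acc c
          | none => acc) PySem.Set.empty
    match pvPriority.find? (fun c => matched.contains c) with
    | some c => c
    | none => "OTHER"

-- ===== PRECONDITION & SPEC =====
def Spec_classify_company_by_filings (form_types : List String) (out : String) : Prop := out = classify_company_by_filings_alt form_types
instance (form_types : List String) (out : String) : Decidable (Spec_classify_company_by_filings form_types out) := by unfold Spec_classify_company_by_filings; infer_instance

-- ===== CLAIM (what is proved, stated in full; the proofs are below) =====
def Claim_equal_classify_company_by_filings : Prop := ∀ (form_types : List String), Dom_classify_company_by_filings form_types → Spec_classify_company_by_filings form_types (classify_company_by_filings form_types)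

-- ===== LEMMAS AND PROOFS =====

-- the inverted index agrees pointwise with A's three pattern lists
lemma lookup_cases (f : String) :
    pvFormCategory.get? f =
      if f = "10-K" ∨ f = "10-Q" then some "US_DOMESTIC"
      else if f = "20-F" ∨ f = "6-K" then some "FOREIGN_PRIVATE"
      else if f = "N-CSR" ∨ f = "N-PORT" ∨ f = "N-CEN" ∨ f = "N-Q" ∨ f = "NPORT-P" ∨ f = "NPORT-EX" then some "FUND"
      else none := by
  by_cases h1 : f = "10-K" ∨ f = "10-Q"
  · rw [if_pos h1]; rcases h1 with rfl | rfl <;> decide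
  · by_cases h2 : f = "20-F" ∨ f = "6-K"
    · rw [if_neg h1, if_pos h2]; rcases h2 with rfl | rfl <;> decide
    · by_cases h3 : f = "N-CSR" ∨ f = "N-PORT" ∨ f = "N-CEN" ∨ f = "N-Q" ∨ f = "NPORT-P" ∨ f = "NPORT-EX"
      · rw [if_neg h1, if_neg h2, if_pos h3]
        rcases h3 with rfl | rfl | rfl | rfl | rfl | rfl <;> decide
      · rw [if_neg h1, if_neg h2, if_neg h3]
        obtain ⟨a1, a2⟩ := not_or.mp h1
        obtain ⟨b1, b2⟩ := not_or.mp h2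
        simp only [not_or] at h3
        obtain ⟨c1, c2, c3, c4, c5, c6⟩ := h3
        have hmk : pvFormCategory = PySem.Dict.mk
            [("10-K", "US_DOMESTIC"), ("10-Q", "US_DOMESTIC"),
             ("20-F", "FOREIGN_PRIVATE"), ("6-K", "FOREIGN_PRIVATE"),
             ("N-CSR", "FUND"), ("N-PORT", "FUND"), ("N-CEN", "FUND"),
             ("N-Q", "FUND"), ("NPORT-P", "FUND"), ("NPORT-EX", "FUND")] := by decide
        rw [hmk]
        simp [PySem.Dict.get?, beq_iff_eq,
              Ne.symm a1, Ne.symm a2, Ne.symm b1, Ne.symm b2,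
              Ne.symm c1, Ne.symm c2, Ne.symm c3, Ne.symm c4, Ne.symm c5, Ne.symm c6]

lemma lookup_us (f : String) :
    pvFormCategory.get? f = some "US_DOMESTIC" ↔ f = "10-K" ∨ f = "10-Q" := by
  rw [lookup_cases]; split_ifs with a b c
  · exact iff_of_true rfl a
  · rcases b with rfl | rfl <;> decide
  · rcases c with rfl | rfl | rfl | rfl | rfl | rfl <;> decide
  · exact iff_of_false (by decide) a

lemma lookup_fp (f : String) :
    pvFormCategory.get? f = some "FOREIGN_PRIVATE" ↔ f = "20-F" ∨ f = "6-K" := by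
  rw [lookup_cases]; split_ifs with a b c
  · rcases a with rfl | rfl <;> decide
  · exact iff_of_true rfl b
  · rcases c with rfl | rfl | rfl | rfl | rfl | rfl <;> decide
  · exact iff_of_false (by decide) b

lemma lookup_fund (f : String) :
    pvFormCategory.get? f = some "FUND" ↔
      f = "N-CSR" ∨ f = "N-PORT" ∨ f = "N-CEN" ∨ f = "N-Q" ∨ f = "NPORT-P" ∨ f = "NPORT-EX" := by
  rw [lookup_cases]; split_ifs with a b c
  · rcases a with rfl | rfl <;> decide
  · rcases b with rfl | rfl <;> decide
  · exact iff_of_true rfl c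
  · exact iff_of_false (by decide) c

-- membership in the matched set built by B's single pass
lemma mem_matched (s acc : List String) (c : String) :
    c ∈ (s.foldl
        (fun acc f =>
          match pvFormCategory.get? f with
          | some cc => PySem.Set.add acc cc
          | none => acc) acc) ↔
      c ∈ acc ∨ ∃ f ∈ s, pvFormCategory.get? f = some c := by
  induction s generalizing acc with
  | nil => simp
  | cons x xs ih =>
    simp only [List.foldl_cons, ih, List.mem_cons]
    cases h : pvFormCategory.get? x with
    | none =>
      constructor
      · rintro (hc | ⟨f, hf, hfc⟩)
        · exact Or.inl hc
        · exact Or.inr ⟨f, Or.inr hf, hfc⟩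
      · rintro (hc | ⟨f, (rfl | hf), hfc⟩)
        · exact Or.inl hc
        · rw [h] at hfc; exact absurd hfc (by simp)
        · exact Or.inr ⟨f, hf, hfc⟩
    | some cc =>
      simp only [PySem.Set.mem_add]
      constructor
      · rintro (⟨hc | rfl⟩ | ⟨f, hf, hfc⟩)
        · exact Or.inl hc
        · exact Or.inr ⟨x, Or.inl rfl, h⟩
        · exact Or.inr ⟨f, Or.inr hf, hfc⟩
      · rintro (hc | ⟨f, (rfl | hf), hfc⟩)
        · exact Or.inl (Or.inl hc)
        · rw [h] at hfc; exact Or.inl (Or.inr (Option.some_inj.mp hfc.symm))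
        · exact Or.inr ⟨f, hf, hfc⟩

-- ===== VERDICT (by name: the statement is the Claim_ definition above) =====
theorem classify_company_by_filings_spec : Claim_equal_classify_company_by_filings := by
  intro ft _
  unfold Spec_classify_company_by_filings classify_company_by_filings classify_company_by_filings_alt
  by_cases hnil : ft = []
  · simp [hnil]
  · simp only [if_neg hnil]
    have hus : FILING_PATTERNS.getD "US_DOMESTIC" [] = ["10-K", "10-Q"] := by decide
    have hfp : FILING_PATTERNS.getD "FOREIGN_PRIVATE" [] = ["20-F", "6-K"] := by decide
    have hfu : FILING_PATTERNS.getD "FUND" [] = ["N-CSR", "N-PORT", "N-CEN", "N-Q", "NPORT-P", "NPORT-EX"] := by decide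
    rw [hus, hfp, hfu]
    by_cases h1 : ∃ f ∈ ft, f = "10-K" ∨ f = "10-Q" <;>
    by_cases h2 : ∃ f ∈ ft, f = "20-F" ∨ f = "6-K" <;>
    by_cases h3 : ∃ f ∈ ft,
        f = "N-CSR" ∨ f = "N-PORT" ∨ f = "N-CEN" ∨ f = "N-Q" ∨ f = "NPORT-P" ∨ f = "NPORT-EX" <;>
    simp [pvPriority, List.find?, List.any_eq_true, PySem.Set.empty,
          mem_matched, lookup_us, lookup_fp, lookup_fund, h1, h2, h3]
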